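-- pv_equiv track=rewrite | github.com/MihaelaDraga/training | Adas_frame1.py | replace_frame
-- ===== SOURCE A (Python) =====
-- def replace_frame(hex_frame,frames):
--     hexupper=hex_frame.upper()
--     initial_list = hexupper.split()
--     replaced_frame = initial_list.copy()
--     for frame in frames:
--         frame_list=frame.split()
--         for i in range(len(initial_list)):
--             if initial_list[i] != frame_list[i]:
--                 replaced_frame[i] = frame_list[i]
--     return ' '.join(replaced_frame)
-- ===== SOURCE B (Python) =====
-- def replace_frame(hex_frame, frames):
--     # Backward search with early exit: the surviving value at a position is the
--     # FIRST frame token differing from the initial token when scanning the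
--     # frames from last to first; stop at the first hit instead of overwriting.
--     initial = hex_frame.upper().split()
--     rev_toks = [f.split() for f in reversed(frames)]
--     out = []
--     for i, w in enumerate(initial):
--         out.append(next((t[i] for t in rev_toks if t[i] != w), w))
--     return ' '.join(out)
-- ===== Notes on version B (the rewrite author's own statement) =====
-- stated objective: alternative
-- what changed: B scans the frames back-to-front and, per position, takes the FIRST token differing from the initial one with an early exit (next on a generator), instead of A's forward pass that overwrites a mutable copy on every differing frame; staged split+reverse, then one backward search per position.
import Mathlib
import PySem

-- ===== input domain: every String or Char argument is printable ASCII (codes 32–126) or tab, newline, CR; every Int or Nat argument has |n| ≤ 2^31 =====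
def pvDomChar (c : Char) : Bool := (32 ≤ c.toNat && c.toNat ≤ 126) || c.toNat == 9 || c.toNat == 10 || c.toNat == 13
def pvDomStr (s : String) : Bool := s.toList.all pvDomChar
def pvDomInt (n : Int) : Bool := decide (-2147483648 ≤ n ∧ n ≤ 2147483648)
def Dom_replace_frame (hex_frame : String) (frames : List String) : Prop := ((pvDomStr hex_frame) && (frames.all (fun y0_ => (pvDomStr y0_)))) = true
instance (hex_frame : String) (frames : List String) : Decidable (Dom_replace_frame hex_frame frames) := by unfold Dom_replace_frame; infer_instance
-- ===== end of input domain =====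

-- B replaces A's forward overwrite-all pass by a back-to-front search with
-- early exit (first differing token from the end wins); alternative algorithm,
-- same worst-case cost.

-- ===== PORT A =====
-- pyGetD/pySetD totalize indexing with a default; under Pre_replace_frame every
-- access is in range, so they compute exactly what A's xs[i] computes.
def replace_frame (hex_frame : String) (frames : List String) : String :=
  let hexupper := PySem.Str.upper hex_frame
  let initial_list := PySem.Str.split₀ hexupper
  let replaced_frame := initial_list
  let replaced :=
    frames.foldl (fun rep frame =>
      let frame_list := PySem.Str.split₀ frame
      (PySem.List.pyRange 0 initial_list.length 1).foldl (fun rep i =>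
        if PySem.List.pyGetD initial_list i "" ≠ PySem.List.pyGetD frame_list i "" then
          PySem.List.pySetD rep i (PySem.List.pyGetD frame_list i "")
        else rep) rep) replaced_frame
  PySem.Str.join " " replaced

-- ===== PORT B =====
def replace_frame_alt (hex_frame : String) (frames : List String) : String :=
  let initial := PySem.Str.split₀ (PySem.Str.upper hex_frame)
  let rev_toks := frames.reverse.map (fun f => PySem.Str.split₀ f)
  let out :=
    (PySem.List.pyRange 0 initial.length 1).map (fun i =>
      let w := PySem.List.pyGetD initial i ""
      match rev_toks.find? (fun t => decide (PySem.List.pyGetD t i "" ≠ w)) with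
      | some t => PySem.List.pyGetD t i ""
      | none => w)
  PySem.Str.join " " out

-- ===== PRECONDITION & SPEC =====
-- Pre_ excludes exactly the inputs where A raises IndexError: some frame splits
-- into fewer tokens than the initial frame (frame_list[i] is out of range).
def Pre_replace_frame (hex_frame : String) (frames : List String) : Prop :=
  ∀ f ∈ frames,
    (PySem.Str.split₀ (PySem.Str.upper hex_frame)).length ≤ (PySem.Str.split₀ f).length
instance (hex_frame : String) (frames : List String) : Decidable (Pre_replace_frame hex_frame frames) := by unfold Pre_replace_frame; infer_instance

def pvWitness_replace_frame : String × List String := ("ab cd", ["AB xy", "ab 7f"])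

def Spec_replace_frame (hex_frame : String) (frames : List String) (out : String) : Prop := out = replace_frame_alt hex_frame frames
instance (hex_frame : String) (frames : List String) (out : String) : Decidable (Spec_replace_frame hex_frame frames out) := by unfold Spec_replace_frame; infer_instance

-- ===== CLAIM (what is proved, stated in full; the proofs are below) =====
def Claim_equal_replace_frame : Prop := ∀ (hex_frame : String) (frames : List String), Dom_replace_frame hex_frame frames → Pre_replace_frame hex_frame frames → Spec_replace_frame hex_frame frames (replace_frame hex_frame frames)

-- ===== LEMMAS AND PROOFS =====

-- inner set-fold characterization
theorem setfold_getD (P : ℕ → Prop) [DecidablePred P] (v : ℕ → String) (m : ℕ)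
    (rep : List String) (hm : m ≤ rep.length) :
    (((List.range m).foldl (fun r i => if P i then r.set i (v i) else r) rep).length
        = rep.length)
    ∧ ∀ j, ((List.range m).foldl (fun r i => if P i then r.set i (v i) else r) rep).getD j ""
        = if j < m ∧ P j then v j else rep.getD j "" := by
  induction m with
  | zero => simp
  | succ m ih =>
    have hm' : m ≤ rep.length := by omega
    obtain ⟨ihl, ihg⟩ := ih hm'
    rw [List.range_succ, List.foldl_append]
    simp only [List.foldl_cons, List.foldl_nil]
    by_cases hP : P m
    · simp only [if_pos hP]
      refine ⟨by simp [ihl], ?_⟩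
      intro j
      by_cases hj : j = m
      · subst hj
        rw [List.getD_eq_getElem?_getD, List.getElem?_set_self (by omega)]
        simp [hP]
      · rw [List.getD_eq_getElem?_getD, List.getElem?_set_ne (by omega), ← List.getD_eq_getElem?_getD, ihg]
        have : (j < m ∧ P j) ↔ (j < m + 1 ∧ P j) := by
          constructor <;> intro ⟨h1, h2⟩ <;> exact ⟨by omega, h2⟩
        rw [if_congr this rfl rfl]
    · simp only [if_neg hP]
      refine ⟨ihl, ?_⟩
      intro j
      rw [ihg]
      by_cases hj : j = m
      · subst hj; simp [hP]
      · have : (j < m ∧ P j) ↔ (j < m + 1 ∧ P j) := by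
          constructor <;> intro ⟨h1, h2⟩ <;> exact ⟨by omega, h2⟩
        rw [if_congr this rfl rfl]

-- A's outer loop, pointwise: each index evolves independently
theorem Achar_getD (initial : List String) (toks : List (List String))
    (rep : List String) (h : rep.length = initial.length) :
    ((toks.foldl (fun rep t =>
        (List.range initial.length).foldl (fun r i =>
          if initial.getD i "" ≠ t.getD i "" then r.set i (t.getD i "") else r) rep) rep).length
      = initial.length)
    ∧ ∀ j, (toks.foldl (fun rep t =>
        (List.range initial.length).foldl (fun r i =>
          if initial.getD i "" ≠ t.getD i "" then r.set i (t.getD i "") else r) rep) rep).getD j ""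
      = if j < initial.length then
          toks.foldl (fun v t => if initial.getD j "" ≠ t.getD j "" then t.getD j "" else v)
            (rep.getD j "")
        else "" := by
  induction toks generalizing rep with
  | nil =>
    refine ⟨h, ?_⟩
    intro j
    by_cases hj : j < initial.length
    · simp [hj]
    · simp only [List.foldl_nil, if_neg hj]
      rw [List.getD_eq_getElem?_getD, List.getElem?_eq_none (by omega)]
      rfl
  | cons t toks ih =>
    simp only [List.foldl_cons]
    set rep' := (List.range initial.length).foldl (fun r i =>
      if initial.getD i "" ≠ t.getD i "" then r.set i (t.getD i "") else r) rep with hrep'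
    obtain ⟨sl, sg⟩ := setfold_getD (fun i => initial.getD i "" ≠ t.getD i "")
      (fun i => t.getD i "") initial.length rep (by omega)
    obtain ⟨ihl, ihg⟩ := ih rep' (by rw [hrep', sl, h])
    refine ⟨ihl, ?_⟩
    intro j
    rw [ihg]
    by_cases hj : j < initial.length
    · simp only [if_pos hj]
      rw [hrep', sg]
      by_cases hne : initial.getD j "" ≠ t.getD j ""
      · simp [hj]
      · rw [not_ne_iff] at hne
        simp only [List.getD_eq_getElem?_getD] at hne
        simp [hne]
    · simp [hj]

-- a keep-last fold equals the first match of the reversed list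
theorem foldl_eq_find_reverse {α β : Type} (P : α → Prop) [DecidablePred P]
    (f : α → β) (L : List α) (d : β) :
    L.foldl (fun v t => if P t then f t else v) d
      = match L.reverse.find? (fun t => decide (P t)) with
        | some t => f t
        | none => d := by
  induction L generalizing d with
  | nil => simp
  | cons t L ih =>
    simp only [List.foldl_cons, List.reverse_cons, List.find?_append]
    rw [ih]
    cases h : L.reverse.find? (fun t => decide (P t)) with
    | some u => simp [h]
    | none =>
      simp only [h, Option.none_or]
      by_cases hP : P t <;> simp [List.find?, hP]

-- ===== VERDICT (by name: the statement is the Claim_ definition above) =====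
set_option maxHeartbeats 1000000 in
theorem replace_frame_spec : Claim_equal_replace_frame := by
  unfold Claim_equal_replace_frame
  intro hex frames _ _
  unfold Spec_replace_frame
  simp only [replace_frame, replace_frame_alt]
  set I := PySem.Str.split₀ (PySem.Str.upper hex) with hI
  congr 1
  simp only [PySem.List.pyRange_one, sub_zero, Int.toNat_natCast, zero_add,
    List.foldl_map, List.map_map, PySem.List.pyGetD_natCast, PySem.List.pySetD_natCast]
  obtain ⟨hlen, hget⟩ := Achar_getD I (frames.map (fun f => PySem.Str.split₀ f)) I rfl
  simp only [List.foldl_map] at hlen hget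
  apply List.ext_getElem
  · simp only [List.length_map, List.length_range, hlen]
  · intro j hj hj2
    have hjn : j < I.length := by rw [hlen] at hj; exact hj
    conv_lhs => rw [← List.getD_eq_getElem _ "" hj]
    rw [hget j, if_pos hjn, List.getElem_map, List.getElem_range]
    rw [foldl_eq_find_reverse (fun f => I.getD j "" ≠ (PySem.Str.split₀ f).getD j "")
      (fun f => (PySem.Str.split₀ f).getD j "")]
    simp only [Function.comp_apply, List.find?_map, Function.comp_def]
    have hpred : (fun t => decide (I.getD j "" ≠ (PySem.Str.split₀ t).getD j ""))
        = (fun f => decide (PySem.List.pyGetD (PySem.Str.split₀ f) (↑j) "" ≠ PySem.List.pyGetD I (↑j) "")) := by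
      funext f
      simp only [PySem.List.pyGetD_natCast, List.getD_eq_getElem?_getD, decide_eq_decide]
      exact ne_comm
    rw [hpred]
    cases h : frames.reverse.find? (fun f => decide (PySem.List.pyGetD (PySem.Str.split₀ f) (↑j) "" ≠ PySem.List.pyGetD I (↑j) "")) with
    | some f => simp [h, PySem.List.pyGetD_natCast, List.getD_eq_getElem?_getD]
    | none => simp [h, PySem.List.pyGetD_natCast, List.getD_eq_getElem?_getD]
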